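-- pv_equiv track=rewrite | github.com/ambertests/adventofcode | aoc_2016/src/day11.py | is_equivalent
-- ===== SOURCE A (Python) =====
-- def is_equivalent(bldg, prev):
--     if bldg in prev:
--         return True
--     for p in reversed(prev):
--         floor_diff = False
--         for f in bldg:
--             if len(p[f]) == len(bldg[f]):
--                 p_gen = len([i for i in p[f] if i < 0])
--                 b_gen = len([i for i in bldg[f] if i < 0])
--                 if p_gen != b_gen:
--                     floor_diff = True
--                     break
--             else:
--                 floor_diff = True
--                 break
--         if not floor_diff:
--             return True
--     return False
-- ===== SOURCE B (Python) =====
-- def is_equivalent(bldg, prev):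
--     def signature(state):
--         return tuple((len(state[f]), sum(1 for i in state[f] if i < 0)) for f in bldg)
--     target = signature(bldg)
--     prev_sigs = {signature(p) for p in prev}
--     return target in prev_sigs
-- ===== Notes on version B (the rewrite author's own statement) =====
-- stated objective: simpler
-- what changed: B replaces A's dict-membership pre-check plus reversed scan with break-flag inner loops by computing a whole-state signature (per-floor length and generator-count) once for bldg, collecting the signatures of all previous states into a set, and testing membership; the 'bldg in prev' check is subsumed by signature equality.
-- outside the precondition, e.g. on is_equivalent({1: [1], 2: []}, [{1: [], 3: []}]): A returns False, B raises KeyError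
import Mathlib
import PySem

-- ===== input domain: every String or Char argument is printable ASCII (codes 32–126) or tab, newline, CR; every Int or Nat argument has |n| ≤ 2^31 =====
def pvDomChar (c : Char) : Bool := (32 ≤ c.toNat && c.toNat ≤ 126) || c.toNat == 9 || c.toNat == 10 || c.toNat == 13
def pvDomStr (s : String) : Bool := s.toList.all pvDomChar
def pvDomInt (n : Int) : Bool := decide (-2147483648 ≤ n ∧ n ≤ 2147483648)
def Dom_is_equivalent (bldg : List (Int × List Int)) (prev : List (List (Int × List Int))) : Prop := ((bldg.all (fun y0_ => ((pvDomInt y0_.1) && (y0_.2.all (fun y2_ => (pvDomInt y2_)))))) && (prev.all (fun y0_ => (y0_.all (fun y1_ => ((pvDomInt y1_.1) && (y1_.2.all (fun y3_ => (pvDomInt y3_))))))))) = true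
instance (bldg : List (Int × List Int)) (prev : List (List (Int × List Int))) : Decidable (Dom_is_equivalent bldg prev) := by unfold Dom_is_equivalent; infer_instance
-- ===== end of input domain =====

-- B replaces A's dict-membership pre-check and reversed break-flag scan by one whole-state
-- signature per state collected into a set and a single membership test (objective: simpler).


-- ===== PORT A =====
-- d[f] on the List-encoded dict: first-match lookup (the type convention's dict semantics); none = KeyError
def pvLookup? (p : List (Int × List Int)) (f : Int) : Option (List Int) :=
  (p.find? (fun kv => kv.1 == f)).map (·.2)

-- Python's `bldg == p` on dicts: order-insensitive, every key present on both sides with the same value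
def pvDictEq (b p : List (Int × List Int)) : Bool :=
  b.all (fun kv => pvLookup? p kv.1 == some kv.2) && p.all (fun kv => pvLookup? b kv.1 == some kv.2)

-- the inner `for f in bldg:` loop computing floor_diff, with its two breaks
def pvFloorDiff (p : List (Int × List Int)) : List (Int × List Int) → Bool
  | [] => false
  | (f, bf) :: rest =>
    let pf := (pvLookup? p f).getD []   -- p[f]; KeyError (none) is excluded by Pre_
    if pf.length == bf.length then
      let p_gen : Int := ((pf.filter (fun i => decide (i < 0))).length : Int)
      let b_gen : Int := ((bf.filter (fun i => decide (i < 0))).length : Int)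
      if p_gen != b_gen then true else pvFloorDiff p rest
    else true

-- the outer `for p in reversed(prev):` loop with its early `return True`
def pvLoopA (bldg : List (Int × List Int)) : List (List (Int × List Int)) → Bool
  | [] => false
  | p :: rest => if pvFloorDiff p bldg then pvLoopA bldg rest else true

def is_equivalent (bldg : List (Int × List Int)) (prev : List (List (Int × List Int))) : Bool :=
  if prev.any (fun p => pvDictEq bldg p) then true
  else pvLoopA bldg prev.reverse

-- ===== PORT B =====
-- signature(state): per floor key of bldg, (len(state[f]), sum(1 for i in state[f] if i < 0))
def pvSig (bldg state : List (Int × List Int)) : List (Int × Int) :=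
  bldg.map (fun kv =>
    let xs := (pvLookup? state kv.1).getD []   -- state[f]; KeyError (none) is excluded by Pre_
    ((xs.length : Int), xs.foldl (fun acc i => if i < 0 then acc + 1 else acc) 0))

def is_equivalent_alt (bldg : List (Int × List Int)) (prev : List (List (Int × List Int))) : Bool :=
  let target := pvSig bldg bldg
  let prev_sigs := PySem.Set.ofList (prev.map (fun p => pvSig bldg p))
  PySem.Set.contains prev_sigs target

-- ===== PRECONDITION & SPEC =====
-- Pre_ excludes (a) assoc lists giving bldg duplicate keys — they encode no Python dict — and
-- (b) inputs where some previous state lacks a floor key of bldg: there A raises KeyError, or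
-- returns early when a preceding floor already differs, while B's full signature build raises.
def Pre_is_equivalent (bldg : List (Int × List Int)) (prev : List (List (Int × List Int))) : Prop :=
  (bldg.map (·.1)).Nodup ∧ ∀ p ∈ prev, ∀ kv ∈ bldg, (pvLookup? p kv.1).isSome
instance (bldg : List (Int × List Int)) (prev : List (List (Int × List Int))) : Decidable (Pre_is_equivalent bldg prev) := by unfold Pre_is_equivalent; infer_instance
def pvWitness_is_equivalent : (List (Int × List Int)) × (List (List (Int × List Int))) :=
  ([(1, [1]), (2, [-1])], [[(1, []), (2, [-1, 2])]])

def Spec_is_equivalent (bldg : List (Int × List Int)) (prev : List (List (Int × List Int))) (out : Bool) : Prop := out = is_equivalent_alt bldg prev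
instance (bldg : List (Int × List Int)) (prev : List (List (Int × List Int))) (out : Bool) : Decidable (Spec_is_equivalent bldg prev out) := by unfold Spec_is_equivalent; infer_instance

-- ===== CLAIM (what is proved, stated in full; the proofs are below) =====
def Claim_equal_is_equivalent : Prop := ∀ (bldg : List (Int × List Int)) (prev : List (List (Int × List Int))), Dom_is_equivalent bldg prev → Pre_is_equivalent bldg prev → Spec_is_equivalent bldg prev (is_equivalent bldg prev)

-- ===== LEMMAS AND PROOFS =====

-- B's generator count is A's filtered-list length
lemma pv_negs_eq (xs : List Int) :
    xs.foldl (fun acc i => if i < 0 then acc + 1 else acc) (0 : Int)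
      = ((xs.filter (fun i => decide (i < 0))).length : Int) := by
  have h := PySem.List.foldl_count_if (fun i : Int => decide (i < 0)) xs 0
  simpa [List.countP_eq_length_filter, decide_eq_true_eq] using h

-- with Nodup keys, looking bldg's own key back up returns the pair's value
lemma pv_lookup_self (bldg : List (Int × List Int)) (h : (bldg.map (·.1)).Nodup)
    {kv : Int × List Int} (hm : kv ∈ bldg) : pvLookup? bldg kv.1 = some kv.2 := by
  induction bldg with
  | nil => cases hm
  | cons hd tl ih =>
    simp only [List.map_cons, List.nodup_cons, List.mem_map] at h
    rcases List.mem_cons.mp hm with rfl | hmem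
    · simp [pvLookup?]
    · have hne : hd.1 ≠ kv.1 := fun he => h.1 ⟨kv, hmem, he.symm⟩
      simp only [pvLookup?, List.find?_cons]
      rw [show (hd.1 == kv.1) = false from beq_eq_false_iff_ne.mpr hne]
      exact ih h.2 hmem

lemma pv_sig_self (bldg : List (Int × List Int)) (h : (bldg.map (·.1)).Nodup) :
    pvSig bldg bldg = bldg.map (fun kv =>
      ((kv.2.length : Int), ((kv.2.filter (fun i => decide (i < 0))).length : Int))) := by
  unfold pvSig
  apply List.map_congr_left
  intro kv hm
  rw [pv_lookup_self bldg h hm]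
  simp [pv_negs_eq]

-- the inner loop returns `floor_diff = false` exactly when the signatures agree
lemma pv_floorDiff_iff (p : List (Int × List Int)) :
    ∀ bl : List (Int × List Int),
      pvFloorDiff p bl = false ↔
        pvSig bl p = bl.map (fun kv =>
          ((kv.2.length : Int), ((kv.2.filter (fun i => decide (i < 0))).length : Int))) := by
  intro bl
  induction bl with
  | nil => simp [pvFloorDiff, pvSig]
  | cons hd tl ih =>
    obtain ⟨f, bf⟩ := hd
    simp only [pvFloorDiff, pvSig, List.map_cons]
    by_cases hlen : ((pvLookup? p f).getD []).length = bf.length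
    · by_cases hgen : (((((pvLookup? p f).getD []).filter (fun i => decide (i < 0))).length : Int)
          = ((bf.filter (fun i => decide (i < 0))).length : Int))
      · simp only [hlen, hgen, pv_negs_eq, beq_self_eq_true, bne_self_eq_false,
          List.cons_eq_cons, pvSig] at ih ⊢
        simpa using ih
      · simp [hlen, hgen, bne, pv_negs_eq]
    · have : (((pvLookup? p f).getD []).length == bf.length) = false :=
        beq_eq_false_iff_ne.mpr hlen
      simp [this, pv_negs_eq]
      intro he; exact absurd (by exact_mod_cast he) hlen

-- the outer loop is an `any` over its list
lemma pv_loopA_any (bldg : List (Int × List Int)) :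
    ∀ l : List (List (Int × List Int)), pvLoopA bldg l = l.any (fun p => !pvFloorDiff p bldg) := by
  intro l
  induction l with
  | nil => rfl
  | cons p rest ih =>
    simp only [pvLoopA, List.any_cons, ih]
    cases pvFloorDiff p bldg
    · simp
    · simp

-- dict equality forces equal signatures
lemma pv_dictEq_sig (bldg p : List (Int × List Int)) (hnd : (bldg.map (·.1)).Nodup)
    (h : pvDictEq bldg p = true) : pvSig bldg p = pvSig bldg bldg := by
  unfold pvSig
  apply List.map_congr_left
  intro kv hm
  have h1 : pvDictEq bldg p = true := h
  unfold pvDictEq at h1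
  rw [Bool.and_eq_true] at h1
  have h2 := (List.all_eq_true.mp h1.1) kv hm
  have hp : pvLookup? p kv.1 = some kv.2 := by simpa using h2
  simp only [hp, pv_lookup_self bldg hnd hm]

-- ===== VERDICT (by name: the statement is the Claim_ definition above) =====
theorem is_equivalent_spec : Claim_equal_is_equivalent := by
  intro bldg prev _hdom hpre
  obtain ⟨hnd, hall⟩ := hpre
  unfold Spec_is_equivalent
  rw [Bool.eq_iff_iff]
  have hB : is_equivalent_alt bldg prev = true ↔ ∃ p ∈ prev, pvSig bldg p = pvSig bldg bldg := by
    unfold is_equivalent_alt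
    rw [PySem.Set.contains_iff, PySem.Set.mem_ofList]
    simp [eq_comm]
  have hmatch : ∀ p ∈ prev, (pvFloorDiff p bldg = false ↔ pvSig bldg p = pvSig bldg bldg) := by
    intro p _hp
    rw [pv_floorDiff_iff p bldg, pv_sig_self bldg hnd]
  rw [hB]
  unfold is_equivalent
  by_cases hmem : prev.any (fun p => pvDictEq bldg p) = true
  · simp only [hmem, if_true, true_iff]
    obtain ⟨p, hp, heq⟩ := List.any_eq_true.mp hmem
    exact ⟨p, hp, pv_dictEq_sig bldg p hnd heq⟩
  · simp only [hmem, if_false, Bool.false_eq_true]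
    rw [pv_loopA_any bldg prev.reverse, List.any_reverse]
    simp only [List.any_eq_true, Bool.not_eq_eq_eq_not, Bool.not_true]
    constructor
    · rintro ⟨p, hp, hfd⟩; exact ⟨p, hp, (hmatch p hp).mp hfd⟩
    · rintro ⟨p, hp, hsig⟩; exact ⟨p, hp, (hmatch p hp).mpr hsig⟩
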